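-- pv_equiv track=rewrite | github.com/apdn7/AnalysisPlatform | histview2/api/setting_module/services/save_load_user_setting.py | map_form_bk
-- ===== SOURCE A (Python) =====
-- def map_form_bk(dic_src_vals, dic_des_vals):
--     mapping_groups = []
--     if len(dic_src_vals) == len(dic_des_vals):
--         names = zip(list(dic_src_vals), list(dic_des_vals))
--         for src_name, des_name in names:
--             mapping_groups.append((des_name, dic_src_vals[src_name], dic_des_vals[des_name]))
--         return mapping_groups
--
--     for form_name, vals in dic_des_vals.items():
--         if form_name in dic_src_vals:
--             mapping_groups.append((form_name, dic_src_vals[form_name], vals))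
--         else:
--             src_vals = [(len(set(form_name) & set(_form_name)), _vals) for _form_name, _vals in dic_src_vals.items()]
--             src_vals = sorted(src_vals, key=lambda x: x[0])[-1]
--
--             mapping_groups.append((form_name, src_vals[1], vals))
--     return mapping_groups
-- ===== SOURCE B (Python) =====
-- def map_form_bk(dic_src_vals, dic_des_vals):
--     if len(dic_src_vals) == len(dic_des_vals):
--         return [(dn, sv, dv)
--                 for (sn, sv), (dn, dv) in zip(dic_src_vals.items(), dic_des_vals.items())]
--     out = []
--     for form_name, vals in dic_des_vals.items():
--         if form_name in dic_src_vals: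
--             best = dic_src_vals[form_name]
--         else:
--             # single linear scan: keep the LAST candidate with maximal name overlap
--             best_ov = -1
--             for _form_name, _vals in dic_src_vals.items():
--                 ov = len(set(form_name) & set(_form_name))
--                 if ov >= best_ov:
--                     best_ov, best = ov, _vals
--         out.append((form_name, best, vals))
--     return out
-- ===== Notes on version B (the rewrite author's own statement) =====
-- stated objective: alternative
-- what changed: The per-destination-key search for the best-overlapping source name no longer builds a list of (overlap, vals) pairs, stable-sorts it and takes the last element: a single linear scan keeps the last candidate of maximal overlap (>= update so the last tie wins, matching sorted(...)[-1]); the equal-length branch becomes a direct zip comprehension over both dicts' items instead of a loop of per-key dict lookups.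
import Mathlib
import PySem

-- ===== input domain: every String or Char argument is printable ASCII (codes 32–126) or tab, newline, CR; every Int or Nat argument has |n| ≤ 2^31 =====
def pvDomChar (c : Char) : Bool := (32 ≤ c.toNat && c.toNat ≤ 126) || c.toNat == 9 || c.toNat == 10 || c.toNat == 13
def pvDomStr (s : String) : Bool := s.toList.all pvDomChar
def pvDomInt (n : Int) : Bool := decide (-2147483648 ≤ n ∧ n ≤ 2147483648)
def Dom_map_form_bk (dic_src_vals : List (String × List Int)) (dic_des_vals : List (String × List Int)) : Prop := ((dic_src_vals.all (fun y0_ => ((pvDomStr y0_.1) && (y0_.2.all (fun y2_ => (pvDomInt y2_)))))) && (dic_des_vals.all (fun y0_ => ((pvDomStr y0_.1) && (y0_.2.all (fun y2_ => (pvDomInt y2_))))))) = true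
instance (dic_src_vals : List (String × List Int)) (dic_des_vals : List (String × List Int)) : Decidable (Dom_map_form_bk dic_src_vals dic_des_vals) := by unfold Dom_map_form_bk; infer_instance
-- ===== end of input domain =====

-- B replaces A's build-list / stable-sort / take-last search for the best-overlapping source name by a
-- single linear scan keeping the last candidate of maximal overlap (and the equal-length branch by a
-- direct zip of the two dicts' items) — objective: alternative (sort removed; measured cost similar,
-- dominated by the per-pair string-set work).

-- ===== PORT A =====
-- len(set(a) & set(b)) — number of distinct common characters
def pyOverlap (a b : String) : Int :=
  PySem.Set.len (PySem.Set.inter (PySem.Set.ofList a.toList) (PySem.Set.ofList b.toList))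

def map_form_bk (dic_src_vals : List (String × List Int)) (dic_des_vals : List (String × List Int)) : List (String × List Int × List Int) :=
  let dsrc := PySem.Dict.ofList dic_src_vals
  let ddes := PySem.Dict.ofList dic_des_vals
  if PySem.Dict.size dsrc = PySem.Dict.size ddes then
    ((PySem.Dict.keys dsrc).zip (PySem.Dict.keys ddes)).foldl
      (fun acc p => acc ++ [(p.2, PySem.Dict.getD dsrc p.1 [], PySem.Dict.getD ddes p.2 [])]) []
  else
    (PySem.Dict.items ddes).foldl
      (fun acc fv =>
        if PySem.Dict.contains dsrc fv.1 then
          acc ++ [(fv.1, PySem.Dict.getD dsrc fv.1 [], fv.2)]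
        else
          -- src_vals = sorted([...], key=fst)[-1]; [-1] of [] (IndexError) is excluded by Pre_
          let src_vals := (PySem.Dict.items dsrc).map (fun q => (pyOverlap fv.1 q.1, q.2))
          let best := ((PySem.List.sorted src_vals (fun x => x.1)).getLast?).getD (0, [])
          acc ++ [(fv.1, best.2, fv.2)]) []

-- ===== PORT B =====
def map_form_bk_alt (dic_src_vals : List (String × List Int)) (dic_des_vals : List (String × List Int)) : List (String × List Int × List Int) :=
  let dsrc := PySem.Dict.ofList dic_src_vals
  let ddes := PySem.Dict.ofList dic_des_vals
  if PySem.Dict.size dsrc = PySem.Dict.size ddes then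
    ((PySem.Dict.items dsrc).zip (PySem.Dict.items ddes)).map (fun p => (p.2.1, p.1.2, p.2.2))
  else
    (PySem.Dict.items ddes).foldl
      (fun acc fv =>
        let best :=
          if PySem.Dict.contains dsrc fv.1 then PySem.Dict.getD dsrc fv.1 []
          else
            -- linear scan: last candidate of maximal overlap wins (>= update)
            ((PySem.Dict.items dsrc).foldl
              (fun b q =>
                let ov := pyOverlap fv.1 q.1
                if b.1 ≤ ov then (ov, q.2) else b) ((-1 : Int), ([] : List Int))).2
        acc ++ [(fv.1, best, fv.2)]) []

-- ===== PRECONDITION & SPEC =====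
-- Pre_ excludes exactly the inputs where A raises (IndexError from sorted([])[-1]): an empty source dict
-- together with a non-empty destination dict; B raises there too (unbound local).
def Pre_map_form_bk (dic_src_vals : List (String × List Int)) (dic_des_vals : List (String × List Int)) : Prop :=
  dic_src_vals ≠ [] ∨ dic_des_vals = []
instance (dic_src_vals : List (String × List Int)) (dic_des_vals : List (String × List Int)) : Decidable (Pre_map_form_bk dic_src_vals dic_des_vals) := by unfold Pre_map_form_bk; infer_instance

def pvWitness_map_form_bk : (List (String × List Int)) × (List (String × List Int)) :=
  ([("ab", [1])], [("ab", [2]), ("bc", [3])])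

def Spec_map_form_bk (dic_src_vals : List (String × List Int)) (dic_des_vals : List (String × List Int)) (out : List (String × List Int × List Int)) : Prop := out = map_form_bk_alt dic_src_vals dic_des_vals
instance (dic_src_vals : List (String × List Int)) (dic_des_vals : List (String × List Int)) (out : List (String × List Int × List Int)) : Decidable (Spec_map_form_bk dic_src_vals dic_des_vals out) := by unfold Spec_map_form_bk; infer_instance

-- ===== CLAIM (what is proved, stated in full; the proofs are below) =====
def Claim_equal_map_form_bk : Prop := ∀ (dic_src_vals : List (String × List Int)) (dic_des_vals : List (String × List Int)), Dom_map_form_bk dic_src_vals dic_des_vals → Pre_map_form_bk dic_src_vals dic_des_vals → Spec_map_form_bk dic_src_vals dic_des_vals (map_form_bk dic_src_vals dic_des_vals)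

-- ===== LEMMAS AND PROOFS =====

-- the scan step of B's inner loop, abstracted over the (overlap, vals) pair
def pvScanStep (b x : Int × List Int) : Int × List Int := if b.1 ≤ x.1 then x else b

-- the same scan lifted to Option (none = nothing seen yet)
def pvOptStep (ob : Option (Int × List Int)) (x : Int × List Int) : Option (Int × List Int) :=
  some (match ob with | none => x | some m => pvScanStep m x)

lemma pv_insertBy_ne_nil (x : Int × List Int) (acc : List (Int × List Int)) :
    PySem.List.insertBy (fun a b => decide (a.1 < b.1)) x acc ≠ [] := by
  cases acc with
  | nil => simp [PySem.List.insertBy]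
  | cons y ys => simp only [PySem.List.insertBy]; split <;> simp

lemma pv_getLast?_insertBy (x : Int × List Int) (acc : List (Int × List Int))
    (hs : acc.Pairwise (fun a b => a.1 ≤ b.1)) :
    (PySem.List.insertBy (fun a b => decide (a.1 < b.1)) x acc).getLast? =
      pvOptStep acc.getLast? x := by
  induction acc with
  | nil => simp [PySem.List.insertBy, pvOptStep]
  | cons y ys ih =>
    rw [List.pairwise_cons] at hs
    simp only [PySem.List.insertBy]
    split
    · -- x.1 < y.1 : x is inserted in front, the last element is unchanged
      rename_i hlt
      simp only [decide_eq_true_eq] at hlt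
      cases hlast : (y :: ys).getLast? with
      | none => simp at hlast
      | some m =>
        have hmem : m ∈ y :: ys := List.mem_of_getLast? hlast
        have hxm : x.1 < m.1 := by
          rcases List.mem_cons.1 hmem with h | h
          · rw [h]; exact hlt
          · exact lt_of_lt_of_le hlt (hs.1 m h)
        rw [List.getLast?_cons_cons, hlast]
        simp only [pvOptStep, pvScanStep]
        rw [if_neg (by omega : ¬ m.1 ≤ x.1)]
    · rename_i hge
      have hyx : y.1 ≤ x.1 := by simp only [decide_eq_true_eq] at hge; omega
      cases ys with
      | nil =>
        simp [PySem.List.insertBy, pvOptStep, pvScanStep, hyx]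
      | cons z zs =>
        obtain ⟨w, ws, heq⟩ := List.exists_cons_of_ne_nil (pv_insertBy_ne_nil x (z :: zs))
        rw [heq, List.getLast?_cons_cons, ← heq, ih hs.2, List.getLast?_cons_cons]

lemma pv_getLast?_foldl_insertBy (xs : List (Int × List Int)) :
    (xs.foldl (fun acc x => PySem.List.insertBy (fun a b => decide (a.1 < b.1)) x acc) []).getLast? =
      xs.foldl pvOptStep none := by
  induction xs using List.reverseRecOn with
  | nil => rfl
  | append_singleton ys x ih =>
    rw [List.foldl_append, List.foldl_append, List.foldl_cons, List.foldl_nil,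
        List.foldl_cons, List.foldl_nil]
    have hsorted : (ys.foldl (fun acc x => PySem.List.insertBy (fun a b => decide (a.1 < b.1)) x acc)
        []).Pairwise (fun a b => a.1 ≤ b.1) := by
      have h := PySem.List.sorted_pairwise ys (fun x : Int × List Int => x.1)
      rwa [PySem.List.sorted_eq_foldl_insertBy] at h
    rw [pv_getLast?_insertBy x _ hsorted, ih]

lemma pv_optStep_some (t : List (Int × List Int)) :
    ∀ b, t.foldl pvOptStep (some b) = some (t.foldl pvScanStep b) := by
  induction t with
  | nil => intro b; rfl
  | cons x xs ih => intro b; simp only [List.foldl_cons, pvOptStep]; exact ih _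

-- last element of the stable ascending sort = left scan keeping the last maximum
lemma pv_lastSorted_eq_scan (l : List (Int × List Int)) (hl : l ≠ [])
    (h0 : ∀ x ∈ l, 0 ≤ x.1) :
    ((PySem.List.sorted l (fun x => x.1)).getLast?).getD (0, []) =
      l.foldl pvScanStep ((-1 : Int), ([] : List Int)) := by
  cases l with
  | nil => exact absurd rfl hl
  | cons z t =>
    rw [PySem.List.sorted_eq_foldl_insertBy, pv_getLast?_foldl_insertBy, List.foldl_cons,
        List.foldl_cons]
    have hz : 0 ≤ z.1 := h0 z (List.mem_cons_self)
    have hstep : pvScanStep ((-1 : Int), ([] : List Int)) z = z := by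
      unfold pvScanStep; rw [if_pos (by omega)]
    have h1 : pvOptStep none z = some z := rfl
    rw [h1, pv_optStep_some, hstep]
    simp

lemma pv_items_update_ne_nil (ps : List (String × List Int)) (d : PySem.Dict String (List Int))
    (hd : d.items ≠ []) : (PySem.Dict.update d ps).items ≠ [] := by
  induction ps generalizing d with
  | nil => exact hd
  | cons p pt ih =>
    show (PySem.Dict.update (d.insert p.1 p.2) pt).items ≠ []
    apply ih
    rw [PySem.Dict.items_insert]
    split
    · simpa using hd
    · simp

lemma pv_items_ofList_ne_nil (l : List (String × List Int)) (hl : l ≠ []) :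
    (PySem.Dict.ofList l).items ≠ [] := by
  cases l with
  | nil => exact absurd rfl hl
  | cons p pt =>
    show (PySem.Dict.update (PySem.Dict.empty.insert p.1 p.2) pt).items ≠ []
    apply pv_items_update_ne_nil
    rw [PySem.Dict.items_insert]
    split
    · rename_i h; simp [PySem.Dict.contains_empty] at h
    · simp

lemma pv_overlap_nonneg (a b : String) : 0 ≤ pyOverlap a b := by
  simp [pyOverlap, PySem.Set.len]

-- ===== VERDICT (by name: the statement is the Claim_ definition above) =====
theorem map_form_bk_spec : Claim_equal_map_form_bk := by
  intro src des _hdom hpre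
  unfold Spec_map_form_bk map_form_bk map_form_bk_alt
  simp only []
  split
  · -- equal sizes: A's foldl over zipped keys = B's map over zipped items
    rw [PySem.List.foldl_append_singleton_eq_map, List.nil_append]
    unfold PySem.Dict.keys
    rw [List.zip_map, List.map_map]
    apply List.map_congr_left
    intro p hp
    obtain ⟨h1, h2⟩ := List.of_mem_zip (a := p.1) (b := p.2) (by simpa using hp)
    have e1 : (PySem.Dict.ofList src).getD p.1.1 [] = p.1.2 :=
      PySem.Dict.getD_of_mem_items _ (by simpa using h1) (PySem.Dict.nodup_keys_ofList src) []
    have e2 : (PySem.Dict.ofList des).getD p.2.1 [] = p.2.2 :=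
      PySem.Dict.getD_of_mem_items _ (by simpa using h2) (PySem.Dict.nodup_keys_ofList des) []
    simp [Prod.map, e1, e2]
  · -- different sizes: per destination item, sorted[-1] = linear scan
    rename_i hne
    apply PySem.List.foldl_congr_mem
    intro acc fv _
    by_cases hc : PySem.Dict.contains (PySem.Dict.ofList src) fv.1
    · simp [hc]
    · simp only [hc, Bool.false_eq_true, if_false]
      -- the source dict is non-empty here: otherwise both dicts were empty and the sizes were equal
      have hsrc : src ≠ [] := by
        rcases hpre with h | h
        · exact h
        · intro hs
          subst h; subst hs
          exact hne rfl
      have hitems : (PySem.Dict.ofList src).items ≠ [] := pv_items_ofList_ne_nil src hsrc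
      have hmapne : ((PySem.Dict.ofList src).items.map
          (fun q => (pyOverlap fv.1 q.1, q.2))) ≠ [] := by
        simpa using hitems
      rw [pv_lastSorted_eq_scan _ hmapne ?h0, List.foldl_map]
      · rfl
      · intro x hx
        simp only [List.mem_map] at hx
        obtain ⟨q, _, rfl⟩ := hx
        exact pv_overlap_nonneg _ _
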